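-- pv_equiv track=rewrite | github.com/ankit-sarin/evidence-engine | analysis/paper1/pass2_branchB_report.py | _section_7_windowed
-- ===== SOURCE A (Python) =====
-- VERDICTS = ("SUPPORTED", "PARTIALLY_SUPPORTED", "UNSUPPORTED")
--
-- def _fmt_pct(n: int, d: int) -> str:
--     return f"{100.0 * n / d:.1f}%" if d else "—"
--
-- def _dist(rows: list[dict], key=lambda r: r["verdict"]) -> dict[str, int]:
--     out: dict[str, int] = {v: 0 for v in VERDICTS}
--     for r in rows:
--         k = key(r)
--         out[k] = out.get(k, 0) + 1
--     return out
--
-- def _section_7_windowed(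
--     rows: list[dict], windowed_triples: set[tuple[str, str]]
-- ) -> list[str]:
--     w_rows = [r for r in rows if (r["paper_id"], r["field_name"]) in windowed_triples]
--     f_rows = [r for r in rows if (r["paper_id"], r["field_name"]) not in windowed_triples]
--     n_w_papers = len({r["paper_id"] for r in w_rows})
--     n_w_triples = len({(r["paper_id"], r["field_name"]) for r in w_rows})
--
--     def _row_line(label: str, rs: list[dict]) -> str:
--         d = _dist(rs)
--         t = sum(d.values())
--         return (f"| {label} | {d['SUPPORTED']} | "
--                 f"{d['PARTIALLY_SUPPORTED']} | {d['UNSUPPORTED']} | "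
--                 f"{t} | {_fmt_pct(d['UNSUPPORTED'], t)} |")
--
--     L = ["## §7. Windowed-path vs full-text-path verdict distribution",
--          "",
--          f"- **Windowed-path coverage:** {n_w_papers} papers, "
--          f"{n_w_triples} triples, {len(w_rows)} arm-rows "
--          "(paper source text exceeded the 20K-token Pass 2 budget "
--          "→ windowed around arm spans via `window_source_text`).",
--          "",
--          "| path | SUPPORTED | PARTIALLY_SUPPORTED | UNSUPPORTED | total | UNSUPPORTED % |",
--          "|---|---:|---:|---:|---:|---:|",
--          _row_line("windowed", w_rows),
--          _row_line("full-text", f_rows),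
--          ""]
--     return L
-- ===== SOURCE B (Python) =====
-- VERDICTS = ("SUPPORTED", "PARTIALLY_SUPPORTED", "UNSUPPORTED")
--
-- def _fmt_pct(n: int, d: int) -> str:
--     return f"{100.0 * n / d:.1f}%" if d else "—"
--
-- def _section_7_windowed(rows, windowed_triples):
--     # One pass over rows: route each row to windowed / full-text accumulators.
--     w_counts = {v: 0 for v in VERDICTS}
--     f_counts = {v: 0 for v in VERDICTS}
--     w_total = 0
--     f_total = 0
--     w_papers = set()
--     w_triples = set()
--     for r in rows:
--         pid = r["paper_id"]
--         fld = r["field_name"]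
--         v = r["verdict"]
--         if (pid, fld) in windowed_triples:
--             w_counts[v] = w_counts.get(v, 0) + 1
--             w_total += 1
--             w_papers.add(pid)
--             w_triples.add((pid, fld))
--         else:
--             f_counts[v] = f_counts.get(v, 0) + 1
--             f_total += 1
--
--     def _line(label: str, d: dict, t: int) -> str:
--         return (f"| {label} | {d['SUPPORTED']} | "
--                 f"{d['PARTIALLY_SUPPORTED']} | {d['UNSUPPORTED']} | "
--                 f"{t} | {_fmt_pct(d['UNSUPPORTED'], t)} |")
--
--     return ["## §7. Windowed-path vs full-text-path verdict distribution",
--             "",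
--             f"- **Windowed-path coverage:** {len(w_papers)} papers, "
--             f"{len(w_triples)} triples, {w_total} arm-rows "
--             "(paper source text exceeded the 20K-token Pass 2 budget "
--             "→ windowed around arm spans via `window_source_text`).",
--             "",
--             "| path | SUPPORTED | PARTIALLY_SUPPORTED | UNSUPPORTED | total | UNSUPPORTED % |",
--             "|---|---:|---:|---:|---:|---:|",
--             _line("windowed", w_counts, w_total),
--             _line("full-text", f_counts, f_total),
--             ""]
-- ===== Notes on version B (the rewrite author's own statement) =====
-- stated objective: alternative
-- what changed: Replaces A's two filter passes, two set comprehensions and per-line _dist+sum rescans by a single pass over rows that routes each row into windowed/full-text verdict-count dicts, running totals and paper/triple sets, the lines then being built directly from the accumulators.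
import Mathlib
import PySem

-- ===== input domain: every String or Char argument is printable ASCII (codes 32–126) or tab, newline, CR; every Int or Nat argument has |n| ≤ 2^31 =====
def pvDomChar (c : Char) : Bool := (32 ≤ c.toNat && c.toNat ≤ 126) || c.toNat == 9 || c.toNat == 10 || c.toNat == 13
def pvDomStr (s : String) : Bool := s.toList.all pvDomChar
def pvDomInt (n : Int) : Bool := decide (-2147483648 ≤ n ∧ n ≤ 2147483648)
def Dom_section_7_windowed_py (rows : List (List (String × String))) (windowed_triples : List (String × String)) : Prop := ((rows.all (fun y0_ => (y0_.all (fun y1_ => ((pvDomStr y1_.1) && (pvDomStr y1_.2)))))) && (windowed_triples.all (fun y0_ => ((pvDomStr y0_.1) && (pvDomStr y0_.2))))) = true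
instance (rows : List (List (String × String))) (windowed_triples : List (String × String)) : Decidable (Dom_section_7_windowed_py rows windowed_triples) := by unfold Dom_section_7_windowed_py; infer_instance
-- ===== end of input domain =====

-- B replaces A's two filter passes, two set comprehensions and per-line _dist+sum rescans by one
-- pass over rows into per-path accumulators (alternative decomposition, same asymptotic cost).
-- Shared helpers (both Python sources use the same module-level `_fmt_pct` and `{v: 0 for v in VERDICTS}`;
-- `r[key]` is the dict-indexing primitive):

-- r[key] under Pre_ (every row has the three keys); exact where the key is present (first match).
def pvGet (r : List (String × String)) (k : String) : String :=
  (PySem.Dict.getD (PySem.Dict.mk r) k "")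

-- round-half-even of x / y (y > 0): IEEE-754 binary64 rounding step of Python's division.
def pvRhe (x y : Nat) : Nat :=
  let q := x / y
  let r := x % y
  if y < 2 * r then q + 1 else if 2 * r < y then q else if q % 2 = 0 then q else q + 1

-- _fmt_pct: f"{100.0*n/d:.1f}%" if d else "—".  Exact emulation of binary64 100.0*n/d followed by
-- '%.1f' for the reachable arguments 0 ≤ n ≤ t: round 100n/t to 53 significant bits (half-even),
-- then to the nearest tenth (a tie there is impossible: m/20 with m odd is not dyadic).
def pvFmtPct (n t : Int) : String :=
  if t == 0 then "—"
  else
    let a := (100 * n).toNat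
    let b := t.toNat
    if a == 0 then "0.0%"
    else
      let e : Int := if b ≤ a then (Nat.log2 (a / b) : Int) else -(Nat.clog 2 ((b + a - 1) / a) : Int)
      let sh := (52 - e).toNat
      let m0 := pvRhe (a * 2 ^ sh) b
      let m := if m0 = 2 ^ 53 then 2 ^ 52 else m0
      let e' := if m0 = 2 ^ 53 then e + 1 else e
      let sh2 := (52 - e').toNat
      let k := pvRhe (10 * m) (2 ^ sh2)
      PySem.Int.toStr ((k / 10 : Nat) : Int) ++ "." ++ PySem.Int.toStr ((k % 10 : Nat) : Int) ++ "%"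

-- {v: 0 for v in VERDICTS}
def pvSeed : PySem.Dict String Int :=
  PySem.Dict.mk [("SUPPORTED", 0), ("PARTIALLY_SUPPORTED", 0), ("UNSUPPORTED", 0)]

-- ===== PORT A =====
-- _dist(rows) with the default key
def pvDist (rs : List (List (String × String))) : PySem.Dict String Int :=
  rs.foldl (fun d r =>
    let k := pvGet r "verdict"
    d.insert k (d.getD k 0 + 1)) pvSeed

-- _row_line
def pvRowLine (label : String) (rs : List (List (String × String))) : String :=
  let d := pvDist rs
  let t := d.values.sum
  "| " ++ label ++ " | " ++ PySem.Int.toStr (d.getD "SUPPORTED" 0) ++ " | "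
    ++ PySem.Int.toStr (d.getD "PARTIALLY_SUPPORTED" 0) ++ " | "
    ++ PySem.Int.toStr (d.getD "UNSUPPORTED" 0) ++ " | "
    ++ PySem.Int.toStr t ++ " | " ++ pvFmtPct (d.getD "UNSUPPORTED" 0) t ++ " |"

def section_7_windowed_py (rows : List (List (String × String))) (windowed_triples : List (String × String)) : List String :=
  let wRows := rows.filter (fun r => windowed_triples.contains (pvGet r "paper_id", pvGet r "field_name"))
  let fRows := rows.filter (fun r => !windowed_triples.contains (pvGet r "paper_id", pvGet r "field_name"))
  let nWPapers := (PySem.Set.ofList (wRows.map (fun r => pvGet r "paper_id"))).length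
  let nWTriples := (PySem.Set.ofList (wRows.map (fun r => (pvGet r "paper_id", pvGet r "field_name")))).length
  ["## §7. Windowed-path vs full-text-path verdict distribution",
   "",
   "- **Windowed-path coverage:** " ++ PySem.Int.toStr (nWPapers : Int) ++ " papers, "
     ++ PySem.Int.toStr (nWTriples : Int) ++ " triples, "
     ++ PySem.Int.toStr (wRows.length : Int)
     ++ " arm-rows (paper source text exceeded the 20K-token Pass 2 budget → windowed around arm spans via `window_source_text`).",
   "",
   "| path | SUPPORTED | PARTIALLY_SUPPORTED | UNSUPPORTED | total | UNSUPPORTED % |",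
   "|---|---:|---:|---:|---:|---:|",
   pvRowLine "windowed" wRows,
   pvRowLine "full-text" fRows,
   ""]

-- ===== PORT B =====
-- _line(label, d, t)
def pvLine (label : String) (d : PySem.Dict String Int) (t : Int) : String :=
  "| " ++ label ++ " | " ++ PySem.Int.toStr (d.getD "SUPPORTED" 0) ++ " | "
    ++ PySem.Int.toStr (d.getD "PARTIALLY_SUPPORTED" 0) ++ " | "
    ++ PySem.Int.toStr (d.getD "UNSUPPORTED" 0) ++ " | "
    ++ PySem.Int.toStr t ++ " | " ++ pvFmtPct (d.getD "UNSUPPORTED" 0) t ++ " |"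

-- the one-pass loop state: (w_counts, f_counts, w_total, f_total, w_papers, w_triples)
def pvStepB (windowed_triples : List (String × String))
    (s : PySem.Dict String Int × PySem.Dict String Int × Int × Int × PySem.Set String × PySem.Set (String × String))
    (r : List (String × String)) :
    PySem.Dict String Int × PySem.Dict String Int × Int × Int × PySem.Set String × PySem.Set (String × String) :=
  let pid := pvGet r "paper_id"
  let fld := pvGet r "field_name"
  let v := pvGet r "verdict"
  if windowed_triples.contains (pid, fld) then
    (s.1.insert v (s.1.getD v 0 + 1), s.2.1, s.2.2.1 + 1, s.2.2.2.1,
     PySem.Set.add s.2.2.2.2.1 pid, PySem.Set.add s.2.2.2.2.2 (pid, fld))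
  else
    (s.1, s.2.1.insert v (s.2.1.getD v 0 + 1), s.2.2.1, s.2.2.2.1 + 1,
     s.2.2.2.2.1, s.2.2.2.2.2)

def section_7_windowed_py_alt (rows : List (List (String × String))) (windowed_triples : List (String × String)) : List String :=
  let st := rows.foldl (pvStepB windowed_triples)
    (pvSeed, pvSeed, (0 : Int), (0 : Int), PySem.Set.empty, PySem.Set.empty)
  let wCounts := st.1
  let fCounts := st.2.1
  let wTotal := st.2.2.1
  let fTotal := st.2.2.2.1
  let wPapers := st.2.2.2.2.1
  let wTriples := st.2.2.2.2.2
  ["## §7. Windowed-path vs full-text-path verdict distribution",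
   "",
   "- **Windowed-path coverage:** " ++ PySem.Int.toStr (wPapers.length : Int) ++ " papers, "
     ++ PySem.Int.toStr (wTriples.length : Int) ++ " triples, "
     ++ PySem.Int.toStr wTotal
     ++ " arm-rows (paper source text exceeded the 20K-token Pass 2 budget → windowed around arm spans via `window_source_text`).",
   "",
   "| path | SUPPORTED | PARTIALLY_SUPPORTED | UNSUPPORTED | total | UNSUPPORTED % |",
   "|---|---:|---:|---:|---:|---:|",
   pvLine "windowed" wCounts wTotal,
   pvLine "full-text" fCounts fTotal,
   ""]

-- ===== PRECONDITION & SPEC =====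
-- Pre_: every row dict carries the keys "paper_id", "field_name" and "verdict" — exactly where the
-- Python A returns normally (a missing key is a KeyError in r["…"]).
def Pre_section_7_windowed_py (rows : List (List (String × String))) (windowed_triples : List (String × String)) : Prop :=
  ∀ r ∈ rows, "paper_id" ∈ r.map Prod.fst ∧ "field_name" ∈ r.map Prod.fst ∧ "verdict" ∈ r.map Prod.fst
instance (rows : List (List (String × String))) (windowed_triples : List (String × String)) : Decidable (Pre_section_7_windowed_py rows windowed_triples) := by unfold Pre_section_7_windowed_py; infer_instance

def pvWitness_section_7_windowed_py : (List (List (String × String))) × (List (String × String)) :=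
  ([[("paper_id", "p1"), ("field_name", "f1"), ("verdict", "SUPPORTED")],
    [("paper_id", "p2"), ("field_name", "f1"), ("verdict", "UNSUPPORTED")]],
   [("p1", "f1")])

def Spec_section_7_windowed_py (rows : List (List (String × String))) (windowed_triples : List (String × String)) (out : List String) : Prop := out = section_7_windowed_py_alt rows windowed_triples
instance (rows : List (List (String × String))) (windowed_triples : List (String × String)) (out : List String) : Decidable (Spec_section_7_windowed_py rows windowed_triples out) := by unfold Spec_section_7_windowed_py; infer_instance

-- ===== CLAIM (what is proved, stated in full; the proofs are below) =====
def Claim_equal_section_7_windowed_py : Prop := ∀ (rows : List (List (String × String))) (windowed_triples : List (String × String)), Dom_section_7_windowed_py rows windowed_triples → Pre_section_7_windowed_py rows windowed_triples → Spec_section_7_windowed_py rows windowed_triples (section_7_windowed_py rows windowed_triples)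


-- ===== LEMMAS AND PROOFS =====

theorem pv_loop_spec (wt : List (String × String)) :
    ∀ (rows : List (List (String × String))) (wc fc : PySem.Dict String Int) (a b : Int)
      (ps : PySem.Set String) (ts : PySem.Set (String × String)),
    rows.foldl (pvStepB wt) (wc, fc, a, b, ps, ts) =
      ((rows.filter (fun r => wt.contains (pvGet r "paper_id", pvGet r "field_name"))).foldl
         (fun d r => let k := pvGet r "verdict"; d.insert k (d.getD k 0 + 1)) wc,
       (rows.filter (fun r => !wt.contains (pvGet r "paper_id", pvGet r "field_name"))).foldl
         (fun d r => let k := pvGet r "verdict"; d.insert k (d.getD k 0 + 1)) fc,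
       a + ((rows.filter (fun r => wt.contains (pvGet r "paper_id", pvGet r "field_name"))).length : Int),
       b + ((rows.filter (fun r => !wt.contains (pvGet r "paper_id", pvGet r "field_name"))).length : Int),
       (rows.filter (fun r => wt.contains (pvGet r "paper_id", pvGet r "field_name"))).foldl
         (fun s r => PySem.Set.add s (pvGet r "paper_id")) ps,
       (rows.filter (fun r => wt.contains (pvGet r "paper_id", pvGet r "field_name"))).foldl
         (fun s r => PySem.Set.add s (pvGet r "paper_id", pvGet r "field_name")) ts) := by
  intro rows
  induction rows with
  | nil => intro wc fc a b ps ts; simp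
  | cons r rest ih =>
    intro wc fc a b ps ts
    by_cases h : wt.contains (pvGet r "paper_id", pvGet r "field_name") = true
    · simp only [List.foldl_cons, List.filter_cons, h, if_pos, pvStepB, Bool.not_true,
        Bool.false_eq_true, if_false, ih, List.length_cons, Prod.mk.injEq]
      push_cast
      and_intros <;> first | trivial | ring
    · simp only [Bool.not_eq_true] at h
      simp only [List.foldl_cons, List.filter_cons, h, Bool.not_false, if_true,
        Bool.false_eq_true, if_false, pvStepB, ih, List.length_cons, Prod.mk.injEq]
      push_cast
      and_intros <;> first | trivial | ring

theorem pvSeed_getD (v : String) : pvSeed.getD v 0 = 0 := by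
  simp [pvSeed, PySem.Dict.getD_eq_get?_getD, PySem.Dict.get?_mk_cons]
  split_ifs <;> rfl

theorem pv_sum_count (K : List String) (hK : K.Nodup) :
    ∀ xs : List String, (∀ x ∈ xs, x ∈ K) →
      (K.map (fun k => (List.count k xs : Int))).sum = (xs.length : Int) := by
  intro xs
  induction xs with
  | nil => intro _; simp
  | cons x xs ih =>
    intro hmem
    have h1 : ∀ k, List.count k (x :: xs) = List.count k xs + (if k == x then 1 else 0) := by
      intro k; rw [List.count_cons, BEq.comm]
    have : (K.map (fun k => (List.count k (x :: xs) : Int))).sum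
        = (K.map (fun k => (List.count k xs : Int) + (if k == x then 1 else 0))).sum := by
      congr 1
      apply List.map_congr_left
      intro k _
      rw [h1 k]; push_cast; rfl
    rw [this, PySem.List.sum_map_add_int,
      ih (fun y hy => hmem y (List.mem_cons_of_mem _ hy))]
    have hx : x ∈ K := hmem x (List.mem_cons_self)
    have : (K.map (fun k => if k == x then (1 : Int) else 0)).sum = (List.countP (· == x) K : Int) := by
      exact PySem.List.sum_map_ite_one_zero (fun k => k == x) K
    rw [this]
    have hc : List.countP (· == x) K = List.count x K := rfl
    rw [hc, List.count_eq_one_of_mem hK hx]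
    push_cast
    simp only [List.length_cons]
    push_cast; ring

theorem pv_sum_values_dist (rs : List (List (String × String))) :
    (pvDist rs).values.sum = (rs.length : Int) := by
  have hfold : pvDist rs = (rs.map (fun r => pvGet r "verdict")).foldl
      (fun d x => d.insert x (d.getD x 0 + 1)) pvSeed := by
    simp [pvDist, List.foldl_map]
  have hseednd : (pvSeed : PySem.Dict String Int).keys.Nodup := by decide
  have hnd : (pvDist rs).keys.Nodup := by
    rw [hfold]
    exact PySem.Dict.nodup_keys_foldl_insert _ (fun d x => d.getD x 0 + 1) pvSeed hseednd
  have hkeys : (pvDist rs).keys = PySem.Set.update pvSeed.keys (rs.map (fun r => pvGet r "verdict")) := by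
    rw [hfold]
    exact PySem.Dict.keys_foldl_insert _ (fun d x => d.getD x 0 + 1) pvSeed
  have hget : ∀ v, (pvDist rs).getD v 0 = (List.count v (rs.map (fun r => pvGet r "verdict")) : Int) := by
    intro v
    rw [hfold, PySem.Dict.getD_foldl_insert_add_one, pvSeed_getD]
    ring
  rw [PySem.Dict.values_eq_map_keys _ hnd 0]
  have : ((pvDist rs).keys.map (fun k => (pvDist rs).getD k 0)).sum
      = ((pvDist rs).keys.map (fun k => (List.count k (rs.map (fun r => pvGet r "verdict")) : Int))).sum := by
    congr 1
    exact List.map_congr_left (fun k _ => hget k)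
  rw [this, hkeys]
  have := pv_sum_count (PySem.Set.update pvSeed.keys (rs.map (fun r => pvGet r "verdict")))
    (hkeys ▸ hnd) (rs.map (fun r => pvGet r "verdict"))
    (fun x hx => (PySem.Set.mem_update _ _ _).mpr (Or.inr hx))
  rw [this]
  simp

theorem pv_set_fold (rs : List (List (String × String))) {β : Type} [BEq β] [LawfulBEq β]
    (f : List (String × String) → β) :
    rs.foldl (fun s r => PySem.Set.add s (f r)) PySem.Set.empty = PySem.Set.ofList (rs.map f) := by
  rw [PySem.Set.ofList_eq_foldl, List.foldl_map]
  rfl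

-- ===== VERDICT (by name: the statement is the Claim_ definition above) =====
theorem section_7_windowed_py_spec : Claim_equal_section_7_windowed_py := by
  intro rows wt _ _
  show section_7_windowed_py rows wt = section_7_windowed_py_alt rows wt
  have hB : ∀ rs : List (List (String × String)),
      rs.foldl (fun d r => let k := pvGet r "verdict"; d.insert k (d.getD k 0 + 1)) pvSeed
        = pvDist rs := fun _ => rfl
  unfold section_7_windowed_py section_7_windowed_py_alt
  rw [pv_loop_spec]
  simp only [hB, pv_set_fold, zero_add, pvRowLine, pvLine, pv_sum_values_dist]
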